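-- pv_equiv track=rewrite | github.com/z-gang/Essential3UTRs | select_utrs.GZ.py | convert_int_to_list
-- ===== SOURCE A (Python) =====
-- def convert_int_to_list(value):
--     if value < 1000:
--         return [value]
--
--     values_list = []
--     while value >= 1000:
--         values_list.append(value % 1000)
--         value = value // 1000
--     values_list.append(value)
--
--     values_list.reverse()
--     return values_list
-- ===== SOURCE B (Python) =====
-- def convert_int_to_list(value):
--     # Forward pass, high-order chunk first: find the largest power-of-1000
--     # divisor not exceeding value, then read chunks top-down; no reverse.
--     if value < 1000:
--         return [value]
--     divisor = 1
--     while divisor * 1000 <= value: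
--         divisor *= 1000
--     out = []
--     while divisor >= 1:
--         out.append((value // divisor) % 1000)
--         divisor //= 1000
--     return out
-- ===== Notes on version B (the rewrite author's own statement) =====
-- stated objective: alternative
-- what changed: Replaces the low-order-first while loop plus list.reverse with a forward pass that first finds the largest power-of-1000 divisor not exceeding value and then emits chunks (value // divisor) % 1000 most-significant-first, so no reverse is needed.
import Mathlib
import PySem

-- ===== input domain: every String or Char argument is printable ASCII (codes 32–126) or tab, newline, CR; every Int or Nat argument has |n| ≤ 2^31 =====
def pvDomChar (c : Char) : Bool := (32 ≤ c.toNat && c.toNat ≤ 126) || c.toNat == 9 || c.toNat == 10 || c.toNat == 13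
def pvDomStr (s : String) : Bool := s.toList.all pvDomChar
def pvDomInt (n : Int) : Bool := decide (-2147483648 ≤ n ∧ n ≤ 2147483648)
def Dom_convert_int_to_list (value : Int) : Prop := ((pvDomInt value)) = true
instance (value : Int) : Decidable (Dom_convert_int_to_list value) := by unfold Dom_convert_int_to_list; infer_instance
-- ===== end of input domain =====

-- B replaces A's low-order-first accumulation + list.reverse with a forward pass:
-- find the largest power-of-1000 divisor ≤ value, then emit chunks most-significant-first.

-- ===== PORT A =====
-- A's while loop: appends value % 1000 low-order first while value >= 1000, then appends the final value
def convertLoopA (value : Int) (values_list : List Int) : List Int :=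
  if value ≥ 1000 then
    convertLoopA (PySem.Int.floordiv value 1000) (values_list ++ [PySem.Int.mod value 1000])
  else values_list ++ [value]
termination_by value.toNat
decreasing_by
  have := PySem.Int.floordiv_eq_iff_of_pos (a := value) (b := (1000 : Int))
    (q := PySem.Int.floordiv value 1000) (by omega) |>.mp rfl
  omega

def convert_int_to_list (value : Int) : List Int :=
  if value < 1000 then [value]
  else (convertLoopA value []).reverse

-- ===== PORT B =====
-- B's first while loop: grow divisor by factors of 1000 while divisor * 1000 <= value
def findDivB (value divisor : Int) (h : 1 ≤ divisor) : Int :=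
  if divisor * 1000 ≤ value then findDivB value (divisor * 1000) (by omega) else divisor
termination_by (value - divisor).toNat
decreasing_by omega

-- B's second while loop: while divisor >= 1, append (value // divisor) % 1000 and divide divisor down
def emitB (value divisor : Int) (out : List Int) : List Int :=
  if 1 ≤ divisor then
    emitB value (PySem.Int.floordiv divisor 1000)
      (out ++ [PySem.Int.mod (PySem.Int.floordiv value divisor) 1000])
  else out
termination_by divisor.toNat
decreasing_by
  have := PySem.Int.floordiv_eq_iff_of_pos (a := divisor) (b := (1000 : Int))
    (q := PySem.Int.floordiv divisor 1000) (by omega) |>.mp rfl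
  omega

def convert_int_to_list_alt (value : Int) : List Int :=
  if value < 1000 then [value]
  else emitB value (findDivB value 1 (by norm_num)) []

-- ===== PRECONDITION & SPEC =====
def Spec_convert_int_to_list (value : Int) (out : List Int) : Prop := out = convert_int_to_list_alt value
instance (value : Int) (out : List Int) : Decidable (Spec_convert_int_to_list value out) := by unfold Spec_convert_int_to_list; infer_instance

-- ===== CLAIM (what is proved, stated in full; the proofs are below) =====
def Claim_equal_convert_int_to_list : Prop := ∀ (value : Int), Dom_convert_int_to_list value → Spec_convert_int_to_list value (convert_int_to_list value)

-- ===== LEMMAS AND PROOFS =====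

-- proof-side reference: the chunk list, high-order first, as a recursion over the quotient
def chunksRef (v : Int) : List Int :=
  if v < 1000 then [v]
  else chunksRef (PySem.Int.floordiv v 1000) ++ [PySem.Int.mod v 1000]
termination_by v.toNat
decreasing_by
  have := PySem.Int.floordiv_eq_iff_of_pos (a := v) (b := (1000 : Int))
    (q := PySem.Int.floordiv v 1000) (by omega) |>.mp rfl
  omega

theorem fd1000_toNat_lt (v : Int) (h : v ≥ 1000) :
    (PySem.Int.floordiv v 1000).toNat < v.toNat := by
  have := PySem.Int.floordiv_eq_iff_of_pos (a := v) (b := (1000 : Int))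
    (q := PySem.Int.floordiv v 1000) (by omega) |>.mp rfl
  omega

theorem convertLoopA_acc (n : Nat) (value : Int) (hn : value.toNat ≤ n) (acc : List Int) :
    convertLoopA value acc = acc ++ convertLoopA value [] := by
  induction n generalizing value acc with
  | zero =>
      rw [convertLoopA, if_neg (by omega), convertLoopA, if_neg (by omega)]
      simp
  | succ n ih =>
      by_cases h : value ≥ 1000
      · have hlt := fd1000_toNat_lt value h
        rw [convertLoopA, if_pos h]
        conv_rhs => rw [convertLoopA, if_pos h]
        simp only [List.nil_append]
        rw [ih _ (by omega) (acc ++ [PySem.Int.mod value 1000]),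
            ih _ (by omega) ([PySem.Int.mod value 1000])]
        simp
      · rw [convertLoopA, if_neg h, convertLoopA, if_neg h]
        simp

theorem loopA_reverse_eq_chunksRef (value : Int) :
    (convertLoopA value []).reverse = chunksRef value := by
  fun_induction chunksRef value with
  | case1 v h =>
      rw [convertLoopA, if_neg (by omega)]
      simp
  | case2 v h ih =>
      rw [convertLoopA, if_pos (by omega),
          convertLoopA_acc _ _ (le_refl ((PySem.Int.floordiv v 1000).toNat))]
      simp only [List.nil_append, List.singleton_append, List.reverse_cons]
      rw [ih]

theorem floordiv_one_self (v : Int) : PySem.Int.floordiv v 1 = v :=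
  (PySem.Int.floordiv_eq_iff_of_pos (by norm_num)).mpr (by omega)

theorem floordiv_mul_1000 (d : Int) : PySem.Int.floordiv (d * 1000) 1000 = d :=
  (PySem.Int.floordiv_eq_iff_of_pos (by norm_num)).mpr (by constructor <;> nlinarith)

theorem one_le_pow_1000 (n : Nat) : (1 : Int) ≤ 1000 ^ n := one_le_pow₀ (by norm_num)

theorem mod_small_1000 (x : Int) (h0 : 0 ≤ x) (h1 : x < 1000) : PySem.Int.mod x 1000 = x := by
  rw [PySem.Int.mod_eq_emod_of_pos (by norm_num : (0:Int) < 1000)]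
  exact Int.emod_eq_of_lt h0 h1

theorem floordiv_floordiv_1000 (v t : Int) (ht : 0 < t) :
    PySem.Int.floordiv (PySem.Int.floordiv v 1000) t = PySem.Int.floordiv v (1000 * t) := by
  have h1 := PySem.Int.floordiv_eq_iff_of_pos (a := v) (b := (1000 : Int))
    (q := PySem.Int.floordiv v 1000) (by norm_num) |>.mp rfl
  have h2 := PySem.Int.floordiv_eq_iff_of_pos (a := PySem.Int.floordiv v 1000) (b := t)
    (q := PySem.Int.floordiv (PySem.Int.floordiv v 1000) t) ht |>.mp rfl
  refine ((PySem.Int.floordiv_eq_iff_of_pos (by positivity)).mpr ⟨?_, ?_⟩).symm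
  · nlinarith [h1.1, h2.1]
  · nlinarith [h1.2, h2.2]

-- chunks of v with divisors 1000^(k+1) … 1 = chunks of v//1000 with divisors 1000^k … 1, then v % 1000
theorem emitB_bridge (k : Nat) (v : Int) (acc : List Int) :
    emitB v ((1000 : Int) ^ (k + 1)) acc
      = emitB (PySem.Int.floordiv v 1000) ((1000 : Int) ^ k) acc ++ [PySem.Int.mod v 1000] := by
  induction k generalizing acc with
  | zero =>
      rw [show ((1000 : Int) ^ (0 + 1)) = 1000 by norm_num,
          show ((1000 : Int) ^ 0) = 1 by norm_num]
      rw [emitB, if_pos (by norm_num), show PySem.Int.floordiv (1000 : Int) 1000 = 1 by decide]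
      rw [emitB, if_pos (by norm_num), show PySem.Int.floordiv (1 : Int) 1000 = 0 by decide]
      rw [emitB, if_neg (by norm_num)]
      conv_rhs =>
        rw [emitB, if_pos (le_refl (1 : Int)),
            show PySem.Int.floordiv (1 : Int) 1000 = 0 by decide]
        rw [emitB, if_neg (by norm_num)]
      simp
  | succ k ih =>
      have hpow : (0 : Int) < 1000 ^ (k + 1) := by positivity
      rw [emitB, if_pos (one_le_pow_1000 (k + 1 + 1))]
      rw [show ((1000 : Int) ^ (k + 1 + 1)) = (1000 : Int) ^ (k + 1) * 1000 by ring,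
          floordiv_mul_1000]
      rw [ih]
      conv_rhs =>
        rw [emitB, if_pos (one_le_pow_1000 (k + 1)),
            show ((1000 : Int) ^ (k + 1)) = (1000 : Int) ^ k * 1000 by ring, floordiv_mul_1000]
      rw [show ((1000 : Int) ^ k * 1000) = (1000 : Int) ^ (k + 1) by ring,
          floordiv_floordiv_1000 v _ hpow,
          show ((1000 : Int) * 1000 ^ (k + 1)) = (1000 : Int) ^ (k + 1) * 1000 by ring]

theorem emitB_eq_chunksRef (k : Nat) (v : Int)
    (hlo : (1000 : Int) ^ (k + 1) ≤ v) (hhi : v < (1000 : Int) ^ (k + 2)) :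
    emitB v ((1000 : Int) ^ (k + 1)) [] = chunksRef v := by
  induction k generalizing v with
  | zero =>
      have hq := PySem.Int.floordiv_eq_iff_of_pos (a := v) (b := (1000 : Int))
        (q := PySem.Int.floordiv v 1000) (by norm_num) |>.mp rfl
      have hb : (1 : Int) ≤ PySem.Int.floordiv v 1000 ∧ PySem.Int.floordiv v 1000 < 1000 := by
        norm_num at hlo hhi; omega
      rw [emitB_bridge, show ((1000 : Int) ^ 0) = 1 by norm_num]
      rw [emitB, if_pos (le_refl (1 : Int)), floordiv_one_self,
          show PySem.Int.floordiv (1 : Int) 1000 = 0 by decide]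
      rw [emitB, if_neg (by norm_num)]
      rw [mod_small_1000 _ (by omega) hb.2]
      rw [chunksRef, if_neg (by norm_num at hlo; omega)]
      rw [chunksRef, if_pos hb.2]
      simp
  | succ k ih =>
      have hq := PySem.Int.floordiv_eq_iff_of_pos (a := v) (b := (1000 : Int))
        (q := PySem.Int.floordiv v 1000) (by norm_num) |>.mp rfl
      have hpow : (0 : Int) < 1000 ^ (k + 1) := by positivity
      have hb : (1000 : Int) ^ (k + 1) ≤ PySem.Int.floordiv v 1000 ∧
          PySem.Int.floordiv v 1000 < (1000 : Int) ^ (k + 2) := by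
        rw [show ((1000 : Int) ^ (k + 1 + 1)) = (1000 : Int) ^ (k + 1) * 1000 by ring] at hlo
        rw [show ((1000 : Int) ^ (k + 1 + 2)) = (1000 : Int) ^ (k + 1) * 1000 * 1000 by ring] at hhi
        rw [show ((1000 : Int) ^ (k + 2)) = (1000 : Int) ^ (k + 1) * 1000 by ring]
        constructor <;> nlinarith [hq.1, hq.2]
      have hnlt : ¬ v < 1000 := by
        rw [show ((1000 : Int) ^ (k + 1 + 1)) = (1000 : Int) ^ (k + 1) * 1000 by ring] at hlo
        nlinarith [one_le_pow_1000 (k + 1)]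
      rw [emitB_bridge, ih _ hb.1 hb.2]
      conv_rhs => rw [chunksRef, if_neg hnlt]

theorem findDivB_spec (v d : Int) (h : 1 ≤ d) (hd : d ≤ v) :
    ∃ k : Nat, findDivB v d h = d * 1000 ^ k ∧ findDivB v d h ≤ v ∧ v < 1000 * findDivB v d h := by
  fun_induction findDivB v d h with
  | case1 d h hcond ih =>
      obtain ⟨k, hk, hle, hlt⟩ := ih hcond
      exact ⟨k + 1, by rw [hk]; ring, hle, hlt⟩
  | case2 d h hcond =>
      exact ⟨0, by ring_nf, hd, by omega⟩

-- ===== VERDICT (by name: the statement is the Claim_ definition above) =====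
theorem convert_int_to_list_spec : Claim_equal_convert_int_to_list := by
  intro value _
  unfold Spec_convert_int_to_list convert_int_to_list convert_int_to_list_alt
  by_cases h : value < 1000
  · rw [if_pos h, if_pos h]
  · rw [if_neg h, if_neg h, loopA_reverse_eq_chunksRef]
    obtain ⟨k, hk, hle, hlt⟩ := findDivB_spec value 1 (by norm_num) (by omega)
    rw [one_mul] at hk
    match k, hk, hle, hlt with
    | 0, hk, hle, hlt => exfalso; norm_num at hk; omega
    | (m + 1), hk, hle, hlt =>
        rw [hk] at hle hlt ⊢
        exact (emitB_eq_chunksRef m value hle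
          (by rw [show ((1000 : Int) ^ (m + 2)) = 1000 * 1000 ^ (m + 1) by ring]; exact hlt)).symm
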